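-- pv_equiv track=rewrite | github.com/ndeutschmann/zunis | zunis_lib/zunis/models/flows/masking.py | iflow_strategy
-- ===== SOURCE A (Python) =====
-- def get_bin(x, n=0):
--     """
--     Get the binary representation of x.
--
--     Parameters
--     ----------
--     x : int
--     n : int
--         Minimum number of digits. If x needs less digits in binary, the rest
--         is filled with zeros.
--
--     Returns
--     -------
--     list of binary digits
--     """
--
--     y = format(x, 'b').zfill(n)
--
--     return [int(i) for i in str(y)]
--
-- def iflow_strategy(d, repetitions=1):
--     """Generate a list of masks using the strategy of Gao et al. arXiv:2001.05486.
--     Each dimension is numbered and the number is converted into the binary representation. Then,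
--     one bit after another, starting with the most significant bit, is converted into a boolean.
--     This determines wether the dimension is transformed in this cell or not. In order to be
--     able to test for all correlations, for each mask, the inverse mask is used too.
--
--
--     The minimal amount of cells will be used to represent all possible correlations.
--
--     Parameters
--     ----------
--     d: int
--         number of dimensions
--
--     Returns
--     -------
--     list of list of bool
--         list of masks
--
--     """
--
--     n = len(get_bin(d - 1, 0))
--     masks = [1] * 2 * n * repetitions
--     dims = [int(i) for i in range(d)]
--
--     dims_bin = [list(x) for x in zip(*list(map(get_bin, dims, [n] * d)))]
--     j = 0
--     for k in range(repetitions):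
--         for i in range(n):
--             s = dims_bin[i][:]
--
--             masks[j] = [bool(x) for x in s]
--
--             masks[j + 1] = [not bool(x) for x in s]
--             j = j + 2
--
--     return (masks)
-- ===== SOURCE B (Python) =====
-- def iflow_strategy(d, repetitions=1):
--     """Build one repetition block of masks from run-length periodic patterns
--     (bit j of the dimension index alternates in runs of length 2**j), then
--     tile the block by list repetition; no per-dimension bit extraction."""
--     n = max((d - 1).bit_length(), 1)
--     block = []
--     w = 1 << (n - 1)
--     while w >= 1:
--         pattern = ([False] * w + [True] * w) * (d // (2 * w) + 1)
--         mask = pattern[:d]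
--         block.append(mask)
--         block.append([not b for b in mask])
--         w >>= 1
--     return block * repetitions
-- ===== Notes on version B (the rewrite author's own statement) =====
-- stated objective: alternative
-- what changed: B builds each mask as a prefix of a run-length periodic pattern (([False]*w+[True]*w) tiled, w halving per step), collects one repetition block, and tiles it with list repetition, instead of formatting every dimension as a zero-filled binary string, transposing the digit matrix with zip(*...) and writing mask/inverse pairs into a pre-sized sentinel list by index.
import Mathlib
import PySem

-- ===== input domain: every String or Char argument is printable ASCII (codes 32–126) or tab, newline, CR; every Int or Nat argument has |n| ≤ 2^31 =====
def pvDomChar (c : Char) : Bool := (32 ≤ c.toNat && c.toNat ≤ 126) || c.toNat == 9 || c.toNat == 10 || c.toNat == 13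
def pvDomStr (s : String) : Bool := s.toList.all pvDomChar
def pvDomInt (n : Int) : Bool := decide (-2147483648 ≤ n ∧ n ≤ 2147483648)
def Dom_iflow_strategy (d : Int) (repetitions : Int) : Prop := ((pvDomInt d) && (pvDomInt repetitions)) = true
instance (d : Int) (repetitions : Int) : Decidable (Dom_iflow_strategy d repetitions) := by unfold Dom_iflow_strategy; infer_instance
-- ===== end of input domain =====

-- B builds masks as prefixes of run-length periodic patterns and tiles one repetition block by list repetition, replacing A's format/zfill/transpose pipeline (alternative decomposition, same cost).

-- ===== PORT A =====
-- binary digits of a natural number, MSB first, as produced by format(m, 'b') for m ≥ 1 (empty for 0)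
def pyBinNat (m : Nat) : List Char :=
  if m = 0 then [] else pyBinNat (m / 2) ++ [if m % 2 = 1 then '1' else '0']
termination_by m
decreasing_by exact Nat.div_lt_self (Nat.pos_of_ne_zero (by assumption)) (by norm_num)

-- format(x, 'b')
def pyFormatB (x : Int) : List Char :=
  if x < 0 then '-' :: pyBinNat x.natAbs
  else if x = 0 then ['0'] else pyBinNat x.toNat

-- str.zfill(n): left-pad with '0' to width n (sign handling irrelevant here: A calls it with x ≥ 0 or n = 0)
def pyZfill (s : List Char) (n : Int) : List Char :=
  List.replicate (n.toNat - s.length) '0' ++ s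

-- get_bin; int(c) ported as code(c) - 48, exact on the digit chars produced for x ≥ 0
-- (on '-', i.e. x < 0, Python raises ValueError — those inputs are excluded by Pre_)
def get_bin (x : Int) (n : Int) : List Int :=
  (pyZfill (pyFormatB x) n).map (fun c => (c.toNat : Int) - 48)

-- zip(*rest) helper: Python zip of the rows of a matrix, truncating at the shortest row
def pyZipAux (l : List Int) (rest : List (List Int)) : List (List Int) :=
  match l with
  | [] => []
  | x :: xs =>
    if rest.any (·.isEmpty) then []
    else (x :: rest.map (fun r => r.headD 0)) :: pyZipAux xs (rest.map List.tail)

def pyZipStar (ls : List (List Int)) : List (List Int) :=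
  match ls with
  | [] => []
  | l :: rest => pyZipAux l rest

def iflow_strategy (d : Int) (repetitions : Int) : List (List Bool) :=
  let n : Nat := (get_bin (d - 1) 0).length
  -- masks = [1] * 2 * n * repetitions; the int sentinels are all overwritten before use, ported as []
  let masks : List (List Bool) := List.replicate (2 * (n : Int) * repetitions).toNat []
  let dims : List Int := PySem.List.pyRange 0 d 1
  -- map(get_bin, dims, [n] * d) zips the two argument lists
  let dims_bin : List (List Int) := pyZipStar (List.zipWith get_bin dims (List.replicate d.toNat (n : Int)))
  let st := (PySem.List.pyRange 0 repetitions 1).foldl (fun st _k =>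
    (PySem.List.pyRange 0 (n : Int) 1).foldl (fun (st : List (List Bool) × Int) i =>
      let s := PySem.List.pyGetD dims_bin i []   -- dims_bin[i][:]; always in range on Pre_
      let m1 := s.map (fun x => decide (x ≠ 0))
      let m2 := s.map (fun x => !decide (x ≠ 0))
      ((st.1.set st.2.toNat m1).set (st.2.toNat + 1) m2, st.2 + 2)) st) (masks, (0 : Int))
  st.1

-- ===== PORT B =====
-- (d-1).bit_length()
def bitLen (m : Nat) : Nat :=
  if m = 0 then 0 else bitLen (m / 2) + 1
termination_by m
decreasing_by exact Nat.div_lt_self (Nat.pos_of_ne_zero (by assumption)) (by norm_num)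

-- the loop body's mask: pattern = ([False]*w + [True]*w) * (d // (2*w) + 1); mask = pattern[:d]
def mkMask (d : Int) (w : Nat) : List Bool :=
  PySem.List.slice
    (List.flatten (List.replicate (PySem.Int.floordiv d (2 * (w : Int)) + 1).toNat
      (List.replicate w false ++ List.replicate w true))) none (some d)

-- while w >= 1: append mask and inverse; w >>= 1
def blockLoop (d : Int) (w : Nat) (acc : List (List Bool)) : List (List Bool) :=
  if h : w = 0 then acc
  else
    let mask := mkMask d w
    blockLoop d (w / 2) (acc ++ [mask, mask.map (fun b => !b)])
termination_by w
decreasing_by exact Nat.div_lt_self (Nat.pos_of_ne_zero h) (by norm_num)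

def iflow_strategy_alt (d : Int) (repetitions : Int) : List (List Bool) :=
  let n : Nat := max (bitLen (d - 1).natAbs) 1
  let block := blockLoop d (2 ^ (n - 1)) []
  -- block * repetitions
  List.flatten (List.replicate repetitions.toNat block)

-- ===== PRECONDITION & SPEC =====
-- A raises ValueError on d ≤ 0 (int('-') on the binary representation of the negative d-1); Pre_ excludes exactly those.
def Pre_iflow_strategy (d : Int) (repetitions : Int) : Prop := 1 ≤ d
instance (d : Int) (repetitions : Int) : Decidable (Pre_iflow_strategy d repetitions) := by
  unfold Pre_iflow_strategy; infer_instance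

def pvWitness_iflow_strategy : Int × Int := (3, 2)

def Spec_iflow_strategy (d : Int) (repetitions : Int) (out : List (List Bool)) : Prop := out = iflow_strategy_alt d repetitions
instance (d : Int) (repetitions : Int) (out : List (List Bool)) : Decidable (Spec_iflow_strategy d repetitions out) := by unfold Spec_iflow_strategy; infer_instance

-- ===== CLAIM (what is proved, stated in full; the proofs are below) =====
def Claim_equal_iflow_strategy : Prop := ∀ (d : Int) (repetitions : Int), Dom_iflow_strategy d repetitions → Pre_iflow_strategy d repetitions → Spec_iflow_strategy d repetitions (iflow_strategy d repetitions)

-- ===== LEMMAS AND PROOFS =====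

-- int-valued binary digits, MSB first
def binDigits (m : Nat) : List Int :=
  if m = 0 then [] else binDigits (m / 2) ++ [((m % 2 : Nat) : Int)]
termination_by m
decreasing_by exact Nat.div_lt_self (Nat.pos_of_ne_zero (by assumption)) (by norm_num)

theorem map_pyBinNat (m : Nat) :
    (pyBinNat m).map (fun c => (c.toNat : Int) - 48) = binDigits m := by
  induction m using Nat.strong_induction_on with
  | _ m ih =>
    rw [pyBinNat, binDigits]
    by_cases h : m = 0
    · simp [h]
    · have := ih (m / 2) (Nat.div_lt_self (Nat.pos_of_ne_zero h) (by norm_num))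
      simp only [h, if_false, List.map_append, this, List.map_cons, List.map_nil]
      congr 1
      rcases Nat.mod_two_eq_zero_or_one m with h2 | h2 <;> simp [h2] <;> decide

theorem len_pyBinNat (m : Nat) : (pyBinNat m).length = bitLen m := by
  induction m using Nat.strong_induction_on with
  | _ m ih =>
    rw [pyBinNat, bitLen]
    by_cases h : m = 0
    · rw [if_pos h, if_pos h]; rfl
    · rw [if_neg h, if_neg h, List.length_append,
        ih (m / 2) (Nat.div_lt_self (Nat.pos_of_ne_zero h) (by norm_num))]
      rfl

theorem len_binDigits (m : Nat) : (binDigits m).length = bitLen m := by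
  rw [← len_pyBinNat, ← map_pyBinNat, List.length_map]

theorem lt_two_pow_bitLen (m : Nat) : m < 2 ^ bitLen m := by
  induction m using Nat.strong_induction_on with
  | _ m ih =>
    rw [bitLen]
    by_cases h : m = 0
    · rw [if_pos h]; omega
    · have := ih (m / 2) (Nat.div_lt_self (Nat.pos_of_ne_zero h) (by norm_num))
      rw [if_neg h, pow_succ]
      omega

theorem bitLen_pos {m : Nat} (h : m ≠ 0) : 1 ≤ bitLen m := by
  rw [bitLen, if_neg h]; omega

-- padded binary digits as a bit-indexed comprehension
theorem padded_binDigits : ∀ (n m : Nat), m < 2 ^ n →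
    List.replicate (n - (binDigits m).length) 0 ++ binDigits m
      = (List.range n).map (fun i => if Nat.testBit m (n - 1 - i) then (1 : Int) else 0) := by
  intro n
  induction n with
  | zero => intro m hm; interval_cases m; simp [binDigits]
  | succ n ih =>
    intro m hm
    by_cases h : m = 0
    · subst h
      rw [binDigits]
      simp [Nat.zero_testBit, List.map_const']
    · rw [binDigits]
      simp only [h, if_false]
      have h2 : m / 2 < 2 ^ n := by rw [pow_succ] at hm; omega
      have hlast : (if Nat.testBit m (n + 1 - 1 - n) then (1 : Int) else 0) = ((m % 2 : Nat) : Int) := by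
        simp only [Nat.add_sub_cancel, Nat.sub_self, Nat.testBit_zero]
        rcases Nat.mod_two_eq_zero_or_one m with h2' | h2' <;> simp [h2']
      have hshift : ∀ i ∈ List.range n,
          (if Nat.testBit m (n + 1 - 1 - i) then (1 : Int) else 0)
            = (if Nat.testBit (m / 2) (n - 1 - i) then (1 : Int) else 0) := by
        intro i hi
        rw [List.mem_range] at hi
        rw [show n + 1 - 1 - i = (n - 1 - i) + 1 by omega, Nat.testBit_add_one]
      rw [List.range_succ, List.map_append, List.map_singleton, hlast,
        List.map_congr_left hshift, ← ih (m / 2) h2]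
      rw [List.length_append, List.length_singleton]
      rw [show n + 1 - ((binDigits (m / 2)).length + 1) = n - (binDigits (m / 2)).length by omega]
      simp

theorem get_bin_eq (n : Nat) (x : Int) (hx : 0 ≤ x) (hlt : x.toNat < 2 ^ n) (hn : 1 ≤ n) :
    get_bin x n = (List.range n).map (fun i => if Nat.testBit x.toNat (n - 1 - i) then (1 : Int) else 0) := by
  unfold get_bin pyZfill pyFormatB
  rw [if_neg (by omega)]
  by_cases h0 : x = 0
  · subst h0
    simp only [if_pos rfl, Int.toNat_natCast, Int.toNat_zero, Nat.zero_testBit,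
      if_false, List.map_const', List.length_range]
    simp only [List.map_append, List.map_replicate, List.map_cons, List.map_nil]
    norm_num
    rw [show (n : Nat) = (n - 1) + 1 by omega, List.replicate_succ']
    simp
  · rw [if_neg h0]
    simp only [List.map_append, List.map_replicate, Int.toNat_natCast]
    norm_num
    rw [map_pyBinNat, len_pyBinNat, ← len_binDigits]
    exact padded_binDigits n x.toNat hlt

theorem pyZipAux_eq : ∀ (l : List Int) (n : Nat) (rest : List (List Int)),
    l.length = n → (∀ r ∈ rest, r.length = n) →
    pyZipAux l rest = (List.range n).map (fun i => (l :: rest).map (fun r => r.getD i 0)) := by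
  intro l
  induction l with
  | nil =>
    intro n rest hl _
    simp at hl; subst hl
    simp [pyZipAux]
  | cons x xs ih =>
    intro n rest hl hrest
    subst hl
    rw [pyZipAux]
    have hne : rest.any (·.isEmpty) = false := by
      rw [List.any_eq_false]
      intro r hr
      have := hrest r hr
      simp only [List.isEmpty_iff]
      intro h; subst h; simp at this
    rw [if_neg (by simp [hne])]
    have htails : ∀ r ∈ rest.map List.tail, r.length = xs.length := by
      intro r hr
      rw [List.mem_map] at hr
      obtain ⟨r', hr', rfl⟩ := hr
      have := hrest r' hr'
      simp [List.length_tail, this]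
    rw [ih xs.length (rest.map List.tail) rfl htails]
    rw [List.length_cons, List.range_succ_eq_map, List.map_cons, List.map_map]
    congr 1
    · simp only [List.map_cons, List.getD_cons_zero]
      congr 1
      apply List.map_congr_left
      intro r hr
      have := hrest r hr
      cases r with
      | nil => simp at this
      | cons y ys => rfl
    · apply List.map_congr_left
      intro i hi
      simp only [Function.comp_apply, List.map_cons, List.getD_cons_succ, List.map_map]
      congr 1
      apply List.map_congr_left
      intro r hr
      have := hrest r hr
      cases r with
      | nil => simp at this
      | cons y ys => rfl

theorem pyZipStar_eq (n : Nat) (ls : List (List Int)) (hne : ls ≠ [])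
    (hlen : ∀ l ∈ ls, l.length = n) :
    pyZipStar ls = (List.range n).map (fun i => ls.map (fun r => r.getD i 0)) := by
  cases ls with
  | nil => exact absurd rfl hne
  | cons l rest =>
    rw [pyZipStar]
    exact pyZipAux_eq l n rest (hlen l (by simp)) (fun r hr => hlen r (by simp [hr]))

theorem zipWith_replicate_right_map {α β γ : Type} (f : α → β → γ) (b : β) :
    ∀ (xs : List α), List.zipWith f xs (List.replicate xs.length b) = xs.map (f · b) := by
  intro xs
  induction xs with
  | nil => rfl
  | cons x xs ih => simp [List.replicate_succ, ih]

theorem foldl_foldl_flatMap {σ α β : Type} (G : σ → α → σ) (outer : List β) (inner : List α) (st : σ) :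
    outer.foldl (fun s _ => inner.foldl G s) st = (outer.flatMap (fun _ => inner)).foldl G st := by
  induction outer generalizing st with
  | nil => rfl
  | cons b bs ih => simp [List.flatMap_cons, List.foldl_append, ih]

theorem set_two (pre tail : List (List Bool)) (x y a b : List Bool) :
    ((pre ++ x :: y :: tail).set pre.length a).set (pre.length + 1) b = pre ++ a :: b :: tail := by
  simp [List.set_append]

theorem fill_foldl {α : Type} (F1 F2 : α → List Bool) :
    ∀ (steps : List α) (pre : List (List Bool)),
    steps.foldl (fun (st : List (List Bool) × Int) a =>
        ((st.1.set st.2.toNat (F1 a)).set (st.2.toNat + 1) (F2 a), st.2 + 2))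
      (pre ++ List.replicate (2 * steps.length) [], (pre.length : Int))
    = (pre ++ steps.flatMap (fun a => [F1 a, F2 a]), (pre.length : Int) + 2 * steps.length) := by
  intro steps
  induction steps with
  | nil => intro pre; simp
  | cons a rest ih =>
    intro pre
    have hrep : List.replicate (2 * (a :: rest).length) ([] : List Bool)
        = [] :: [] :: List.replicate (2 * rest.length) [] := by
      rw [show 2 * (a :: rest).length = (2 * rest.length) + 1 + 1 by simp; ring]
      simp [List.replicate_succ]
    rw [hrep, List.foldl_cons]
    rw [show ((pre.length : Int)).toNat = pre.length from Int.toNat_natCast _]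
    rw [set_two]
    have hshape : (pre ++ F1 a :: F2 a :: List.replicate (2 * rest.length) [])
        = (pre ++ [F1 a, F2 a]) ++ List.replicate (2 * rest.length) [] := by simp
    have hj : (pre.length : Int) + 2 = (((pre ++ [F1 a, F2 a]).length : Nat) : Int) := by
      simp
    rw [hshape, hj, ih (pre ++ [F1 a, F2 a])]
    rw [Prod.mk.injEq]
    refine ⟨by simp, ?_⟩
    simp only [List.length_append, List.length_cons, List.length_nil]
    push_cast
    ring

theorem two_n_reps (n : Nat) (reps : Int) :
    (2 * (n : Int) * reps).toNat = 2 * (reps.toNat * n) := by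
  by_cases h : reps ≤ 0
  · have h1 : 2 * (n : Int) * reps ≤ 0 :=
      mul_nonpos_of_nonneg_of_nonpos (by positivity) h
    simp [Int.toNat_of_nonpos h1, Int.toNat_of_nonpos h]
  · obtain ⟨r, rfl⟩ : ∃ r : Nat, reps = (r : Int) :=
      ⟨reps.toNat, (Int.toNat_of_nonneg (by omega)).symm⟩
    rw [show (2 * (n : Int) * (r : Int)) = ((2 * (r * n) : Nat) : Int) by push_cast; ring,
      Int.toNat_natCast, Int.toNat_natCast]

-- characterization of A's transposed digit matrix
theorem dims_bin_eq (d : Int) (hd : 1 ≤ d) (n : Nat) (hn : 1 ≤ n)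
    (hbound : (d - 1).toNat < 2 ^ n) :
    pyZipStar (List.zipWith get_bin (PySem.List.pyRange 0 d 1) (List.replicate d.toNat (n : Int)))
      = (List.range n).map (fun i => (List.range d.toNat).map
          (fun k => if Nat.testBit k (n - 1 - i) then (1 : Int) else 0)) := by
  rw [PySem.List.pyRange_one, sub_zero]
  rw [show List.replicate d.toNat ((n : Nat) : Int)
      = List.replicate (List.map (fun k : Nat => (0 : Int) + (k : Int)) (List.range d.toNat)).length
          ((n : Nat) : Int) from by rw [List.length_map, List.length_range]]
  rw [zipWith_replicate_right_map, List.map_map]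
  simp only [Function.comp_def]
  have hget : ∀ k ∈ List.range d.toNat,
      get_bin ((0 : Int) + (k : Int)) (n : Int)
        = (List.range n).map (fun i => if Nat.testBit k (n - 1 - i) then (1 : Int) else 0) := by
    intro k hk
    rw [List.mem_range] at hk
    have h0 : (0 : Int) + (k : Int) = (k : Int) := zero_add _
    have ht : (k : Int).toNat = k := Int.toNat_natCast k
    rw [h0, get_bin_eq n (k : Int) (by positivity)
      (by rw [ht]; exact lt_of_le_of_lt (by omega) hbound) hn, ht]
  rw [List.map_congr_left (fun k hk => hget k hk)]
  rw [pyZipStar_eq n _ (by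
    have hne : d.toNat ≠ 0 := by omega
    simp [List.range_eq_nil, hne]) (by
    intro l hl
    rw [List.mem_map] at hl
    obtain ⟨k, _, rfl⟩ := hl
    simp)]
  apply List.map_congr_left
  intro i hi
  rw [List.mem_range] at hi
  rw [List.map_map]
  apply List.map_congr_left
  intro k hk
  simp only [Function.comp_apply]
  rw [List.getD_eq_getElem?_getD, List.getElem?_map, List.getElem?_range hi]
  rfl

theorem nA_eq (d : Int) (hd : 1 ≤ d) :
    (get_bin (d - 1) 0).length = max (bitLen (d - 1).natAbs) 1 := by
  unfold get_bin pyZfill pyFormatB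
  rw [if_neg (by omega : ¬ d - 1 < 0)]
  have habs : (d - 1).natAbs = (d - 1).toNat := by omega
  by_cases h0 : d - 1 = 0
  · rw [if_pos h0, h0]
    rw [show ((0 : Int).natAbs) = 0 from rfl, show bitLen 0 = 0 from by rw [bitLen]; rfl]
    simp
  · rw [if_neg h0, habs]
    have hpos : (d - 1).toNat ≠ 0 := by omega
    rw [Nat.max_eq_left (bitLen_pos hpos)]
    simp [len_pyBinNat]

-- ===== B-side lemmas =====

theorem getElem_flatten_replicate {α : Type} (pat : List α) :
    ∀ (cnt k : Nat) (hk : k < cnt * pat.length)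
      (h : k < (List.flatten (List.replicate cnt pat)).length)
      (h2 : k % pat.length < pat.length),
    (List.flatten (List.replicate cnt pat))[k] = pat[k % pat.length] := by
  intro cnt
  induction cnt with
  | zero => intro k hk; omega
  | succ c ih =>
    intro k hk h h2
    have hlenc : (List.flatten (List.replicate c pat)).length = c * pat.length := by
      simp [List.length_flatten, List.map_replicate, Nat.mul_comm]
    have heq : List.flatten (List.replicate (c + 1) pat)
        = pat ++ List.flatten (List.replicate c pat) := by
      rw [List.replicate_succ, List.flatten_cons]
    rw [List.getElem_of_eq heq]
    by_cases hlt : k < pat.length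
    · rw [List.getElem_append_left hlt]
      congr 1
      exact (Nat.mod_eq_of_lt hlt).symm
    · have hge : pat.length ≤ k := by omega
      rw [List.getElem_append_right hge]
      have hk' : k - pat.length < c * pat.length := by
        have hp : 0 < pat.length := by omega
        have : (c + 1) * pat.length = c * pat.length + pat.length := by
          rw [Nat.add_mul, Nat.one_mul]
        omega
      rw [ih (k - pat.length) hk' (by rw [hlenc]; omega) (by rwa [← Nat.mod_eq_sub_mod hge])]
      congr 1
      exact (Nat.mod_eq_sub_mod hge).symm

theorem pat_getElem (w j : Nat) (h : j < (List.replicate w false ++ List.replicate w true).length) :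
    (List.replicate w false ++ List.replicate w true)[j] = decide (w ≤ j) := by
  by_cases hlt : j < w
  · rw [List.getElem_append_left (by simpa using hlt)]
    simp [List.getElem_replicate]
    omega
  · rw [List.getElem_append_right (by simpa using hlt)]
    simp [List.getElem_replicate]
    omega

theorem mkMask_eq (d : Int) (hd : 1 ≤ d) (w : Nat) (hw : 1 ≤ w) :
    mkMask d w = (List.range d.toNat).map (fun k => decide (k / w % 2 = 1)) := by
  unfold mkMask
  have hfd : PySem.Int.floordiv d (2 * (w : Int)) + 1 = (((d.toNat / (2 * w) + 1 : Nat)) : Int) := by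
    rw [show d = ((d.toNat : Nat) : Int) by omega,
      show (2 * ((w : Nat) : Int)) = (((2 * w : Nat)) : Int) by push_cast; ring,
      PySem.Int.floordiv_natCast]
    push_cast [Int.toNat_natCast]; ring
  rw [hfd, Int.toNat_natCast]
  set c : Nat := d.toNat / (2 * w) + 1 with hc
  have hpatlen : (List.replicate w false ++ List.replicate w true).length = 2 * w := by
    simp; ring
  have hflen : (List.flatten (List.replicate c (List.replicate w false ++ List.replicate w true))).length
      = c * (List.replicate w false ++ List.replicate w true).length := by
    simp [List.length_flatten, List.map_replicate, Nat.mul_comm]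
  have hdc : d.toNat ≤ c * (List.replicate w false ++ List.replicate w true).length := by
    rw [hpatlen]
    have h1 : 2 * w * (d.toNat / (2 * w)) + d.toNat % (2 * w) = d.toNat := Nat.div_add_mod _ _
    have h2 : d.toNat % (2 * w) < 2 * w := Nat.mod_lt _ (by omega)
    have h3 : c * (2 * w) = 2 * w * (d.toNat / (2 * w)) + 2 * w := by
      rw [hc, Nat.add_mul, Nat.one_mul, Nat.mul_comm]
    omega
  rw [PySem.List.slice_to _ (by omega : (0 : Int) ≤ d)]
  apply List.ext_getElem
  · rw [List.length_take, hflen, List.length_map, List.length_range]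
    omega
  · intro k h1 h2
    have hk : k < d.toNat := by simpa using h2
    have hkc : k < c * (List.replicate w false ++ List.replicate w true).length := by omega
    rw [List.getElem_take]
    rw [getElem_flatten_replicate _ c k hkc (by rw [hflen]; omega)
      (Nat.mod_lt _ (by omega)), pat_getElem]
    simp only [List.getElem_map, List.getElem_range, List.length_append, List.length_replicate]
    have hdiv : k % (w * 2) / w = k / w % 2 := Nat.mod_mul_right_div_self k w 2
    have hww : w + w = w * 2 := by ring
    rw [hww, decide_eq_decide]
    have hr : k % (w * 2) < w * 2 := Nat.mod_lt _ (by omega)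
    constructor
    · intro h
      rw [← hdiv]
      exact Nat.div_eq_of_lt_le (by omega) (by omega)
    · intro h
      by_contra hcon
      push_neg at hcon
      rw [← hdiv, Nat.div_eq_of_lt hcon] at h
      omega

theorem blockLoop_pow (d : Int) : ∀ (m : Nat) (acc : List (List Bool)),
    blockLoop d (2 ^ m) acc
      = acc ++ (List.range (m + 1)).flatMap
          (fun i => [mkMask d (2 ^ (m - i)), (mkMask d (2 ^ (m - i))).map (fun b => !b)]) := by
  intro m
  induction m with
  | zero =>
    intro acc
    rw [blockLoop]
    simp only [pow_zero]
    rw [dif_neg (by omega)]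
    rw [blockLoop]
    simp
  | succ m ih =>
    intro acc
    rw [blockLoop]
    rw [dif_neg (by positivity)]
    have hhalf : 2 ^ (m + 1) / 2 = 2 ^ m := by
      rw [pow_succ, Nat.mul_div_cancel _ (by norm_num)]
    rw [hhalf, ih]
    conv_rhs => rw [List.range_succ_eq_map, List.flatMap_cons, List.flatMap_map]
    simp only [Nat.sub_zero, Nat.succ_eq_add_one, Function.comp_def, Nat.succ_sub_succ,
      List.append_assoc]

theorem testBit_div_pow (j : Nat) : ∀ k : Nat, Nat.testBit k j = decide (k / 2 ^ j % 2 = 1) := by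
  induction j with
  | zero => intro k; simp [Nat.testBit_zero]
  | succ j ih =>
    intro k
    rw [Nat.testBit_add_one, ih, Nat.div_div_eq_div_mul, ← pow_succ']

theorem testBit_mask (d : Int) (hd : 1 ≤ d) (j : Nat) :
    mkMask d (2 ^ j) = (List.range d.toNat).map (fun k => Nat.testBit k j) := by
  rw [mkMask_eq d hd (2 ^ j) (Nat.one_le_two_pow)]
  apply List.map_congr_left
  intro k _
  rw [testBit_div_pow]

theorem flatMap_const_flatten {α β : Type} (l : List α) (x : List β) :
    l.flatMap (fun _ => x) = (List.replicate l.length x).flatten := by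
  rw [List.flatMap_def, List.map_const']

-- ===== VERDICT (by name: the statement is the Claim_ definition above) =====
theorem iflow_strategy_spec : Claim_equal_iflow_strategy := by
  intro d reps _ hd
  have hd' : 1 ≤ d := hd
  unfold Spec_iflow_strategy
  simp only [iflow_strategy, iflow_strategy_alt]
  rw [nA_eq d hd']
  set n : Nat := max (bitLen (d - 1).natAbs) 1 with hn_def
  have hn : 1 ≤ n := Nat.le_max_right _ 1
  have habs : (d - 1).natAbs = (d - 1).toNat := by omega
  have hbound : (d - 1).toNat < 2 ^ n := by
    calc (d - 1).toNat < 2 ^ bitLen (d - 1).toNat := lt_two_pow_bitLen _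
    _ ≤ 2 ^ n := Nat.pow_le_pow_right (by norm_num) (by rw [hn_def, habs]; exact Nat.le_max_left _ 1)
  rw [dims_bin_eq d hd' n hn hbound]
  set DB := (List.range n).map (fun i => (List.range d.toNat).map
      (fun k => if Nat.testBit k (n - 1 - i) then (1 : Int) else 0)) with hDB
  set L : List Int := (PySem.List.pyRange 0 reps 1).flatMap
      (fun _ => PySem.List.pyRange 0 (n : Int) 1) with hLdef
  have hL : L.length = reps.toNat * n := by
    rw [hLdef, List.length_flatMap]
    simp [PySem.List.length_pyRange_one]
  rw [foldl_foldl_flatMap]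
  rw [show (List.replicate (2 * (n : Int) * reps).toNat ([] : List Bool), (0 : Int))
      = (([] : List (List Bool)) ++ List.replicate (2 * L.length) ([] : List Bool),
         ((([] : List (List Bool)).length : Nat) : Int)) from by
    rw [hL, two_n_reps]; simp]
  rw [fill_foldl (fun i => (PySem.List.pyGetD DB i []).map (fun x => decide (x ≠ 0)))
      (fun i => (PySem.List.pyGetD DB i []).map (fun x => !decide (x ≠ 0))) L []]
  simp only [List.nil_append]
  rw [hLdef, List.flatMap_assoc]
  have hinner : (PySem.List.pyRange 0 (n : Int) 1).flatMap
      (fun i => [(PySem.List.pyGetD DB i []).map (fun x => decide (x ≠ 0)),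
                 (PySem.List.pyGetD DB i []).map (fun x => !decide (x ≠ 0))])
      = blockLoop d (2 ^ (n - 1)) [] := by
    rw [blockLoop_pow, List.nil_append]
    rw [show n - 1 + 1 = n by omega]
    rw [PySem.List.pyRange_one, sub_zero, Int.toNat_natCast, List.flatMap_map]
    apply List.flatMap_congr
    intro i hi
    rw [List.mem_range] at hi
    simp only [Function.comp_apply, zero_add, PySem.List.pyGetD_natCast]
    rw [hDB, List.getD_eq_getElem?_getD, List.getElem?_map, List.getElem?_range hi]
    simp only [Option.map_some, Option.getD_some, List.map_map]
    rw [testBit_mask d hd' (n - 1 - i), List.map_map]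
    have hb1 : ∀ (b : Bool), (decide ((if b then (1 : Int) else 0) ≠ 0)) = b := by decide
    congr 1
    · apply List.map_congr_left
      intro dim _
      simp only [Function.comp_apply, hb1]
    · congr 1
      apply List.map_congr_left
      intro dim _
      simp only [Function.comp_apply, hb1]
  rw [hinner, flatMap_const_flatten]
  congr 1
  simp [PySem.List.length_pyRange_one]
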